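-- pv_equiv track=rewrite | github.com/caleblevy/funcstructs | funcstructs/structures/_treefuncs.py | tree_properties
-- ===== SOURCE A (Python) =====
-- from collections import defaultdict
--
-- def funclevels_iterator(levels):
--     """Lazily generate the function of a level tree and each node's level"""
--     levels = iter(levels)
--     root = previous_level = next(levels)
--     f = node = 0
--     yield node, 0, f  # node, normalized height, and what it's mapped to
--     grafting_point = {0: 0}
--     for node, level in enumerate(levels, start=1):
--         if level > previous_level:
--             f = grafting_point[previous_level-root]
--             previous_level += 1
--         else:
--             f = grafting_point[level-root-1]
--             previous_level = level
--         yield node, level-root, f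
--         grafting_point[level-root] = node
--
-- def tree_properties(levels):
--     """Return an endofunction corresponding to a sequence of levels"""
--     func = []
--     hg = [[]]
--     preim = defaultdict(list)
--     for n, l, f in funclevels_iterator(levels):
--         func.append(f)
--         preim[f].append(n)
--         if l >= len(hg):
--             hg.append([])
--         hg[l].append(n)
--     preim[0].pop(0)
--     return func, preim, hg
-- ===== SOURCE B (Python) =====
-- from collections import defaultdict
--
-- def tree_properties(levels):
--     """Return an endofunction corresponding to a sequence of levels"""
--     levels = list(levels)
--     if not levels:
--         raise RuntimeError("level sequence is empty")
--     root = levels[0]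
--     func = [0]
--     preim = defaultdict(list)
--     preim[0].append(0)
--     hg = [[0]]
--     stack = [0]  # stack[h] = last node seen at normalized height h on the current path
--     for node, level in enumerate(levels[1:], start=1):
--         nl = level - root
--         f = stack[nl - 1]
--         func.append(f)
--         preim[f].append(node)
--         if nl >= len(hg):
--             hg.append([])
--         hg[nl].append(node)
--         stack[nl:] = [node]
--     preim[0].pop(0)
--     return func, preim, hg
-- ===== Notes on version B (the rewrite author's own statement) =====
-- stated objective: simpler
-- what changed: Replaces the generator's level->last-node grafting dict and its two ascend/descend branches with an ancestor-path stack giving one uniform parent lookup stack[nl-1], fused with the accumulation into a single pass.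
import Mathlib
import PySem

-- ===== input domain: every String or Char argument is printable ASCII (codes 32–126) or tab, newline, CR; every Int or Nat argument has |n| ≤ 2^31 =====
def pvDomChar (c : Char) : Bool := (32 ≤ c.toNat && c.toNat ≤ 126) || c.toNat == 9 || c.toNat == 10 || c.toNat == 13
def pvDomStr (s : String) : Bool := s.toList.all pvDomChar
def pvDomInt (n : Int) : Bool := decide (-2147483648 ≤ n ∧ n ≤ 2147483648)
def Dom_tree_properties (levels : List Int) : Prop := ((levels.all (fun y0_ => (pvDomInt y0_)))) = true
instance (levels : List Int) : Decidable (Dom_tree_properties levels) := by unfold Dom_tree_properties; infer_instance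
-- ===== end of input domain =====

-- B replaces A's level→last-node grafting dict and its two ascend/descend branches with a single
-- ancestor-path stack and one uniform parent lookup, fused into one pass (objective: simpler).

-- the body of the consumer loop, shared verbatim by both Pythons:
-- func.append(f); preim[f].append(n) (defaultdict); grow hg if needed; hg[l].append(n)
def pvStep (st : List Int × PySem.Dict Int (List Int) × List (List Int)) (n l f : Int) :
    List Int × PySem.Dict Int (List Int) × List (List Int) :=
  let hg := if l ≥ (st.2.2.length : Int) then st.2.2 ++ [[]] else st.2.2
  -- hg[l].append(n): exact for 0 ≤ l (guaranteed by Pre_; Python would wrap a negative index)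
  (st.1 ++ [f], st.2.1.modify f [] (· ++ [n]), hg.modify l.toNat (· ++ [n]))

-- ===== PORT A =====
-- funclevels_iterator after the first yield: the generator's remaining (node, level-root, f) triples
def funclevels_go (root : Int) (gp : PySem.Dict Int Int) (previous : Int) (node : Int) :
    List Int → List (Int × Int × Int)
  | [] => []
  | level :: rest =>
    let n := node + 1
    if level > previous then
      -- f = grafting_point[previous_level-root]  (KeyError ↦ default 0; excluded by Pre_)
      let f := gp.getD (previous - root) 0
      (n, level - root, f) :: funclevels_go root (gp.insert (level - root) n) (previous + 1) n rest
    else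
      -- f = grafting_point[level-root-1]  (KeyError ↦ default 0; excluded by Pre_)
      let f := gp.getD (level - root - 1) 0
      (n, level - root, f) :: funclevels_go root (gp.insert (level - root) n) level n rest

def tree_properties (levels : List Int) : List Int × (List (Int × List Int)) × List (List Int) :=
  match levels with
  | [] => ([], [], [[]])  -- Python: RuntimeError from next() on an empty iterator; excluded by Pre_
  | root :: rest =>
    let ts := (0, 0, 0) :: funclevels_go root (PySem.Dict.empty.insert 0 0) root 0 rest
    let st := ts.foldl (fun st t => pvStep st t.1 t.2.1 t.2.2) ([], PySem.Dict.empty, [[]])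
    -- preim[0].pop(0)
    (st.1, (st.2.1.modify 0 [] (·.tail)).items, st.2.2)

-- ===== PORT B =====
def bGo (root : Int) (st : List Int × PySem.Dict Int (List Int) × List (List Int))
    (stack : List Int) (node : Int) : List Int → List Int × PySem.Dict Int (List Int) × List (List Int)
  | [] => st
  | level :: rest =>
    let nl := level - root
    -- f = stack[nl - 1]  (IndexError ↦ default 0; excluded by Pre_)
    let f := (PySem.List.pyGet? stack (nl - 1)).getD 0
    bGo root (pvStep st node nl f) (PySem.List.slice stack (some 0) (some nl) ++ [node]) (node + 1) rest

def tree_properties_alt (levels : List Int) : List Int × (List (Int × List Int)) × List (List Int) :=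
  match levels with
  | [] => ([], [], [])  -- Python: explicit RuntimeError; excluded by Pre_
  | root :: rest =>
    -- func = [0]; preim = {0: [0]}; hg = [[0]]; stack = [0]
    let st := bGo root ([0], PySem.Dict.empty.insert 0 [0], [[0]]) [0] 1 rest
    (st.1, (st.2.1.modify 0 [] (·.tail)).items, st.2.2)

-- ===== PRECONDITION & SPEC =====
-- levels must be a valid rooted level sequence: nonempty, and every later entry l with predecessor p
-- satisfies root+1 ≤ l ≤ p+1. Outside this A raises (RuntimeError/KeyError/IndexError) or — on an
-- upward jump of more than one level after a descent — returns an accidental graft onto leftover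
-- previous_level state, where B's stack implementation raises IndexError.
def pvChain (root previous : Int) : List Int → Bool
  | [] => true
  | l :: rest => root + 1 ≤ l && l ≤ previous + 1 && pvChain root l rest

def Pre_tree_properties (levels : List Int) : Prop :=
  levels ≠ [] ∧ pvChain (levels.headD 0) (levels.headD 0) levels.tail = true

instance (levels : List Int) : Decidable (Pre_tree_properties levels) := by
  unfold Pre_tree_properties; infer_instance

def pvWitness_tree_properties : List Int := [5, 6, 7, 7, 6, 7]

def Spec_tree_properties (levels : List Int) (out : List Int × (List (Int × List Int)) × List (List Int)) : Prop := out = tree_properties_alt levels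
instance (levels : List Int) (out : List Int × (List (Int × List Int)) × List (List Int)) : Decidable (Spec_tree_properties levels out) := by unfold Spec_tree_properties; infer_instance

-- ===== CLAIM (what is proved, stated in full; the proofs are below) =====
def Claim_equal_tree_properties : Prop := ∀ (levels : List Int), Dom_tree_properties levels → Pre_tree_properties levels → Spec_tree_properties levels (tree_properties levels)

-- ===== LEMMAS AND PROOFS =====

-- reading a nonnegative in-range index is unaffected by what follows the prefix
theorem pv_pyGet_append (xs ys : List Int) (h : Int) (h0 : 0 ≤ h) (hlt : h < (xs.length : Int)) :
    PySem.List.pyGet? (xs ++ ys) h = PySem.List.pyGet? xs h := by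
  rw [PySem.List.pyGet?_of_nonneg _ h0, PySem.List.pyGet?_of_nonneg _ h0]
  exact List.getElem?_append_left (by omega)

theorem pv_pyGet_take (xs : List Int) (k : Nat) (h : Int) (h0 : 0 ≤ h) (hlt : h < (k : Int)) :
    PySem.List.pyGet? (xs.take k) h = PySem.List.pyGet? xs h := by
  rw [PySem.List.pyGet?_of_nonneg _ h0, PySem.List.pyGet?_of_nonneg _ h0]
  exact List.getElem?_take_of_lt (by omega)

-- invariant: the grafting dict agrees with B's ancestor stack on all heights up to previous-root
theorem pv_main (root : Int) : ∀ (rest : List Int) (gp : PySem.Dict Int Int) (previous node : Int)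
    (st : List Int × PySem.Dict Int (List Int) × List (List Int)) (stack : List Int),
    pvChain root previous rest = true →
    0 ≤ previous - root →
    stack.length = (previous - root).toNat + 1 →
    (∀ h : Int, 0 ≤ h → h ≤ previous - root → gp.getD h 0 = (PySem.List.pyGet? stack h).getD 0) →
    (funclevels_go root gp previous node rest).foldl (fun st t => pvStep st t.1 t.2.1 t.2.2) st
      = bGo root st stack (node + 1) rest := by
  intro rest
  induction rest with
  | nil =>
    intro gp previous node st stack _ _ _ _
    simp [funclevels_go, bGo]
  | cons level rest ih =>
    intro gp previous node st stack hch hprev hlen hgp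
    simp only [pvChain, Bool.and_eq_true, decide_eq_true_eq] at hch
    obtain ⟨⟨h1, h2⟩, h3⟩ := hch
    have hlenZ : (stack.length : Int) = previous - root + 1 := by omega
    by_cases hgt : level > previous
    · -- ascend: level = previous + 1, the new node extends the current path
      have hlev : level = previous + 1 := by omega
      simp only [funclevels_go, bGo, if_pos hgt, List.foldl_cons]
      have hf : gp.getD (previous - root) 0 = (PySem.List.pyGet? stack (level - root - 1)).getD 0 := by
        have he : level - root - 1 = previous - root := by omega
        rw [he]; exact hgp _ hprev le_rfl
      rw [hf]
      have hsl : PySem.List.slice stack (some 0) (some (level - root)) = stack := by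
        rw [PySem.List.slice_zero_start, PySem.List.slice_to stack (by omega)]
        have : (level - root).toNat = stack.length := by omega
        rw [this, List.take_length]
      rw [hsl, show previous + 1 = level by omega]
      apply ih (gp.insert (level - root) (node + 1)) level (node + 1) _ (stack ++ [node + 1]) h3
        (by omega) (by simp; omega)
      intro h hh0 hhle
      rw [PySem.Dict.getD_insert]
      by_cases he : h = level - root
      · rw [if_pos he, show h = (stack.length : Int) by omega,
          PySem.List.pyGet?_append_length (pre := stack) (y := node + 1) (ys := [])]
        rfl
      · rw [if_neg he, pv_pyGet_append stack [node + 1] h hh0 (by omega)]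
        exact hgp h hh0 (by omega)
    · -- descend or stay: truncate the path to height level-root
      simp only [funclevels_go, bGo, if_neg hgt, List.foldl_cons]
      have hf : gp.getD (level - root - 1) 0 = (PySem.List.pyGet? stack (level - root - 1)).getD 0 :=
        hgp _ (by omega) (by omega)
      rw [hf, PySem.List.slice_zero_start, PySem.List.slice_to stack (by omega)]
      apply ih (gp.insert (level - root) (node + 1)) level (node + 1) _
        (stack.take (level - root).toNat ++ [node + 1]) h3 (by omega)
        (by simp; omega)
      intro h hh0 hhle
      rw [PySem.Dict.getD_insert]
      by_cases he : h = level - root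
      · have hlt : (stack.take (level - root).toNat).length = (level - root).toNat := by
          simp; omega
        rw [if_pos he, show h = ((stack.take (level - root).toNat).length : Int) by omega,
          PySem.List.pyGet?_append_length (pre := stack.take (level - root).toNat)
            (y := node + 1) (ys := [])]
        rfl
      · rw [if_neg he,
          pv_pyGet_append (stack.take (level - root).toNat) [node + 1] h hh0 (by simp; omega),
          pv_pyGet_take stack ((level - root).toNat) h hh0 (by omega)]
        exact hgp h hh0 (by omega)

theorem tree_properties_spec : Claim_equal_tree_properties := by
  intro levels _ hpre
  unfold Spec_tree_properties
  match levels with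
  | [] => exact absurd rfl hpre.1
  | root :: rest =>
    have hch : pvChain root root rest = true := hpre.2
    simp only [tree_properties, tree_properties_alt, List.foldl_cons]
    have hinit : pvStep ([], PySem.Dict.empty, [[]]) 0 0 0
        = ([0], PySem.Dict.empty.insert 0 [0], [[0]]) := by decide
    rw [hinit]
    rw [pv_main root rest (PySem.Dict.empty.insert 0 0) root 0
      ([0], PySem.Dict.empty.insert 0 [0], [[0]]) [0] hch (by omega) (by simp)
      (fun h hh0 hhle => by rw [show h = 0 by omega]; decide)]
    norm_num
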